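-- pv_equiv track=rewrite | github.com/hotttao/tools | uml/k8s/gen_puml/merge_comments.py | merge_comment_lines
-- ===== SOURCE A (Python) =====
-- def merge_comment_lines(lines):
--     """
--     合并连续的多行注释到一行
--     """
--     merged_lines = []
--     comment_lines = []
--     for line in lines:
--         stripped_line = line.strip()
--         if stripped_line.startswith('//'):
--             comment_lines.append(stripped_line.lstrip('/').strip())
--         else:
--             if len(comment_lines) > 0:
--                 merged_comment = '// ' + ' '.join(comment_lines) + '\n'
--                 merged_lines.append(merged_comment)
--                 comment_lines = []
--             merged_lines.append(line)
--     if len(comment_lines) > 0: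
--         merged_comment = '// ' + ' '.join(comment_lines) + '\n'
--         merged_lines.append(merged_comment)
--     return merged_lines
-- ===== SOURCE B (Python) =====
-- def merge_comment_lines(lines):
--     # run-based two-pointer rewrite: find each maximal run of comment lines
--     # and emit its merge in one step, instead of A's accumulator/flush loop
--     out = []
--     i = 0
--     n = len(lines)
--     while i < n:
--         if lines[i].strip().startswith('//'):
--             j = i
--             while j < n and lines[j].strip().startswith('//'):
--                 j += 1
--             out.append('// ' + ' '.join(l.strip().lstrip('/').strip() for l in lines[i:j]) + '\n')
--             i = j
--         else:
--             out.append(lines[i])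
--             i += 1
--     return out
-- ===== Notes on version B (the rewrite author's own statement) =====
-- stated objective: alternative
-- what changed: Replaces A's accumulator/flush state machine with a run-based two-pointer scan that finds each maximal run of comment lines and emits its merged form in one step.
import Mathlib
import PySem

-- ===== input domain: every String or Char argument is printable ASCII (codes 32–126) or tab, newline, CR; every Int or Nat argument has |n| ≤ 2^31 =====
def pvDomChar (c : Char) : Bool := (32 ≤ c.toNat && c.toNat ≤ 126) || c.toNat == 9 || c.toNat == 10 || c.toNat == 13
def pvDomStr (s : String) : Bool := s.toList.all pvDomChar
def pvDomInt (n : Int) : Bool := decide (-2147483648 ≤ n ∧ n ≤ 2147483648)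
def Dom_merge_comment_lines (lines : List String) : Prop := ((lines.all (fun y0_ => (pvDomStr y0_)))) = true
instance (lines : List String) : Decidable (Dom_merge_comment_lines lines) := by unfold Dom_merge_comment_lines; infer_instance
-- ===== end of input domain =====

-- B replaces A's accumulator/flush loop with a run-based scan that merges each
-- maximal run of comment lines in one step (objective: alternative).


-- shared text primitives (both Pythons contain these same expressions)
-- s.lstrip('/'): drop leading '/' characters; ported by hand (exact: ASCII char-by-char strip)
def pvLstripSlash (s : String) : String := String.ofList (s.toList.dropWhile (· == '/'))

def pvIsComment (line : String) : Bool := PySem.Str.startswith (PySem.Str.strip line) "//"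

def pvPiece (line : String) : String := PySem.Str.strip (pvLstripSlash (PySem.Str.strip line))

def pvFlush (cs : List String) : String := "// " ++ PySem.Str.join " " cs ++ "\n"

-- ===== PORT A =====
-- A's for-loop over lines with state (merged_lines, comment_lines), then the final flush
def pvAStep (st : List String × List String) (line : String) : List String × List String :=
  if pvIsComment line then (st.1, st.2 ++ [pvPiece line])
  else if st.2.length > 0 then (st.1 ++ [pvFlush st.2] ++ [line], [])
  else (st.1 ++ [line], st.2)

def merge_comment_lines (lines : List String) : List String :=
  let st := lines.foldl pvAStep ([], [])
  if st.2.length > 0 then st.1 ++ [pvFlush st.2] else st.1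

-- ===== PORT B =====
-- Source B's outer while-loop: each step consumes either one maximal comment run
-- (the inner `while j < n` scan = takeWhile / dropWhile) or one plain line
def merge_comment_lines_alt (lines : List String) : List String :=
  match lines with
  | [] => []
  | l :: ls =>
    if pvIsComment l then
      pvFlush ((l :: ls.takeWhile pvIsComment).map pvPiece) ::
        merge_comment_lines_alt (ls.dropWhile pvIsComment)
    else
      l :: merge_comment_lines_alt ls
termination_by lines.length
decreasing_by
  · simpa using Nat.lt_succ_of_le (ls.length_dropWhile_le pvIsComment)
  · simp

-- ===== PRECONDITION & SPEC =====
def Spec_merge_comment_lines (lines : List String) (out : List String) : Prop := out = merge_comment_lines_alt lines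
instance (lines : List String) (out : List String) : Decidable (Spec_merge_comment_lines lines out) := by unfold Spec_merge_comment_lines; infer_instance

-- ===== CLAIM (what is proved, stated in full; the proofs are below) =====
def Claim_equal_merge_comment_lines : Prop := ∀ (lines : List String), Dom_merge_comment_lines lines → Spec_merge_comment_lines lines (merge_comment_lines lines)

-- ===== LEMMAS AND PROOFS =====

-- A's loop with the pending-comments accumulator, written recursively
def pvBGo (cs : List String) : List String → List String
  | [] => if cs.length > 0 then [pvFlush cs] else []
  | l :: ls =>
    if pvIsComment l then pvBGo (cs ++ [pvPiece l]) ls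
    else (if cs.length > 0 then [pvFlush cs] else []) ++ l :: pvBGo [] ls

lemma pvA_eq_bGo (lines : List String) : ∀ (merged cs : List String),
    (let st := lines.foldl pvAStep (merged, cs)
     if st.2.length > 0 then st.1 ++ [pvFlush st.2] else st.1) = merged ++ pvBGo cs lines := by
  induction lines with
  | nil =>
    intro merged cs
    simp only [List.foldl_nil, pvBGo]
    split <;> simp
  | cons l ls ih =>
    intro merged cs
    simp only [List.foldl_cons, pvBGo, pvAStep]
    by_cases h : pvIsComment l = true
    · simp [h, ih]
    · simp only [h, if_false, Bool.false_eq_true]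
      by_cases h2 : cs.length > 0
      · simp [h2, ih]
      · simp [ih, List.eq_nil_of_length_eq_zero (Nat.eq_zero_of_not_pos h2)]

lemma pvBGo_eq_alt (lines : List String) : ∀ (cs : List String),
    pvBGo cs lines =
      if cs.length > 0 then
        pvFlush (cs ++ (lines.takeWhile pvIsComment).map pvPiece) ::
          merge_comment_lines_alt (lines.dropWhile pvIsComment)
      else merge_comment_lines_alt lines := by
  induction lines with
  | nil =>
    intro cs
    simp only [pvBGo, List.takeWhile_nil, List.dropWhile_nil, List.map_nil, List.append_nil,
      merge_comment_lines_alt]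
  | cons l ls ih =>
    intro cs
    by_cases h : pvIsComment l = true
    · have hne : (cs ++ [pvPiece l]).length > 0 := by simp
      simp only [pvBGo, h, if_true, ih, hne, List.takeWhile_cons, List.dropWhile_cons]
      by_cases h2 : cs.length > 0
      · simp [h2]
      · have : cs = [] := List.eq_nil_of_length_eq_zero (Nat.eq_zero_of_not_pos h2)
        subst this
        simp [merge_comment_lines_alt, h]
    · simp only [pvBGo, h, if_false, Bool.false_eq_true, ih]
      by_cases h2 : cs.length > 0
      · simp [merge_comment_lines_alt, h, h2]
      · have : cs = [] := List.eq_nil_of_length_eq_zero (Nat.eq_zero_of_not_pos h2)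
        subst this
        simp [merge_comment_lines_alt, h]

-- ===== VERDICT (by name: the statement is the Claim_ definition above) =====
theorem merge_comment_lines_spec : Claim_equal_merge_comment_lines := by
  intro lines _
  unfold Spec_merge_comment_lines merge_comment_lines
  have h := pvA_eq_bGo lines [] []
  simp only [List.nil_append] at h
  rw [h, pvBGo_eq_alt]
  simp
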